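-- pv_equiv track=rewrite | github.com/matt-chv/HEX4Humans | Hex4Humans.py | bf_status
-- ===== SOURCE A (Python) =====
-- BF_RESET_VAL = "Bit Field Reset Value"
--
-- def bf_status(row, bf_delta_status):
--     """ return a string indicating how the different bit fields are different
--     r if one or more different from reset value
--     b if one or more different between each other (provided 2 or more dumps where processed)
--
--     this is then used by the javascript for hiding or not rows
--     """
--
--     status = ""
--
--     bf_values = []
--     for i in range(len(bf_delta_status)):
--         bf_values.append(row[bf_delta_status[i]])
--
--     bf_values = list(set(bf_values))
--     if len(bf_values)>1:
--         status="b"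
--     for bf in bf_values:
--         if not bf == row[BF_RESET_VAL]:
--             status+="r"
--             break
--
--     return status
-- ===== SOURCE B (Python) =====
-- BF_RESET_VAL = "Bit Field Reset Value"
--
-- def bf_status(row, bf_delta_status):
--     """Single pass over bf_delta_status: flag 'b' when two looked-up values
--     differ (compare each value to the first one seen) and 'r' when any value
--     differs from the reset value; row[BF_RESET_VAL] is only read inside the
--     loop, so an empty bf_delta_status touches row not at all, like A."""
--     seen_first = False
--     first = None
--     differ = False
--     reset = False
--     for key in bf_delta_status:
--         v = row[key]
--         if not seen_first:
--             first = v
--             seen_first = True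
--         elif v != first:
--             differ = True
--         if v != row[BF_RESET_VAL]:
--             reset = True
--     return ("b" if differ else "") + ("r" if reset else "")
-- ===== Notes on version B (the rewrite author's own statement) =====
-- stated objective: simpler
-- what changed: Replaces A's three phases (build a value list, dedup it through set(), scan the dedup for a non-reset value) with one pass over bf_delta_status keeping two boolean flags (any value unequal to the first seen; any value unequal to the reset value).
import Mathlib
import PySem

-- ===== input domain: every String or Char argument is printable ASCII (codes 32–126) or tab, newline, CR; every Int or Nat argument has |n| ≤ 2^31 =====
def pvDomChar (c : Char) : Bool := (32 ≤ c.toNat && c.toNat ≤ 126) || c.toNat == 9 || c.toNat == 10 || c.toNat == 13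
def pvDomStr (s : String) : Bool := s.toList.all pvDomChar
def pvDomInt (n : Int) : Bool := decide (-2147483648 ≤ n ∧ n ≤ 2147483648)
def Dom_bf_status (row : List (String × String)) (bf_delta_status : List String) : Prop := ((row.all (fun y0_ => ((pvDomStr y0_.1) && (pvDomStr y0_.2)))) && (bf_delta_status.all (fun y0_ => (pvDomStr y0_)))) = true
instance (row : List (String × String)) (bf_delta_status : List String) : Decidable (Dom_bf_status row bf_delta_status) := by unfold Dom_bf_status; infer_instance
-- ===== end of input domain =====

-- B computes the same status string in ONE pass over bf_delta_status with two boolean flags,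
-- instead of A's three phases (build value list, dedup via set(), scan the dedup).

def pvResetKey : String := "Bit Field Reset Value"

-- ===== PORT A =====
-- row lookup row[k]; Pre_ guarantees the key is present, so the "" default is never the result
def pvLookup (row : List (String × String)) (k : String) : String :=
  (row.lookup k).getD ""

-- the 'for bf in bf_values: if not bf == row[BF_RESET_VAL]: status += "r"; break' loop
def bfRLoop (row : List (String × String)) (status : String) : List String → String
  | [] => status
  | bf :: rest =>
    if !(bf == pvLookup row pvResetKey) then status ++ "r" else bfRLoop row status rest

def bf_status (row : List (String × String)) (bf_delta_status : List String) : String :=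
  let status := ""
  let bf_values := bf_delta_status.foldl (fun acc k => acc ++ [pvLookup row k]) []
  let bf_values := PySem.Set.ofList bf_values
  let status := if bf_values.length > 1 then "b" else status
  bfRLoop row status bf_values

-- ===== PORT B =====
-- the single for-loop of Source B over (first, differ, reset); first = none ↔ 'not seen_first'
def altLoop (row : List (String × String)) :
    List String → Option String → Bool → Bool → Bool × Bool
  | [], _, differ, reset => (differ, reset)
  | k :: rest, first, differ, reset =>
    let v := pvLookup row k
    let reset' := reset || (v != pvLookup row pvResetKey)
    match first with
    | none => altLoop row rest (some v) differ reset'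
    | some f => altLoop row rest (some f) (differ || (v != f)) reset'

def bf_status_alt (row : List (String × String)) (bf_delta_status : List String) : String :=
  let p := altLoop row bf_delta_status none false false
  (if p.1 then "b" else "") ++ (if p.2 then "r" else "")

-- ===== PRECONDITION & SPEC =====
-- Pre_ excludes exactly the inputs where Python A raises KeyError: a key of bf_delta_status
-- missing from row, or (when bf_delta_status is nonempty) BF_RESET_VAL missing from row.
def Pre_bf_status (row : List (String × String)) (bf_delta_status : List String) : Prop :=
  (∀ k ∈ bf_delta_status, (row.lookup k).isSome = true) ∧
  (bf_delta_status ≠ [] → (row.lookup pvResetKey).isSome = true)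
instance (row : List (String × String)) (bf_delta_status : List String) : Decidable (Pre_bf_status row bf_delta_status) := by unfold Pre_bf_status; infer_instance

def pvWitness_bf_status : (List (String × String)) × List String :=
  ([("Bit Field Reset Value", "0"), ("a", "1")], ["a"])

def Spec_bf_status (row : List (String × String)) (bf_delta_status : List String) (out : String) : Prop := out = bf_status_alt row bf_delta_status
instance (row : List (String × String)) (bf_delta_status : List String) (out : String) : Decidable (Spec_bf_status row bf_delta_status out) := by unfold Spec_bf_status; infer_instance

-- ===== CLAIM (what is proved, stated in full; the proofs are below) =====
def Claim_equal_bf_status : Prop := ∀ (row : List (String × String)) (bf_delta_status : List String), Dom_bf_status row bf_delta_status → Pre_bf_status row bf_delta_status → Spec_bf_status row bf_delta_status (bf_status row bf_delta_status)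

-- ===== LEMMAS AND PROOFS =====

-- A's break-loop appends "r" iff some scanned value differs from the reset value
theorem bfRLoop_eq (row : List (String × String)) (status : String) (l : List String) :
    bfRLoop row status l =
      if l.any (fun bf => bf != pvLookup row pvResetKey) then status ++ "r" else status := by
  induction l with
  | nil => simp [bfRLoop]
  | cons bf rest ih =>
    by_cases h : bf = pvLookup row pvResetKey
    · have hb : (bf != pvLookup row pvResetKey) = false := by simp [h]
      simp [bfRLoop, h, ih]
    · have hb : (bf != pvLookup row pvResetKey) = true := by simp [h]
      simp [bfRLoop, hb, h]

theorem altLoop_snd (row : List (String × String)) (l : List String)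
    (first : Option String) (differ reset : Bool) :
    (altLoop row l first differ reset).2 =
      (reset || l.any (fun k => pvLookup row k != pvLookup row pvResetKey)) := by
  induction l generalizing first differ reset with
  | nil => simp [altLoop]
  | cons k rest ih =>
    cases first <;> simp [altLoop, ih, Bool.or_assoc]

theorem altLoop_fst_some (row : List (String × String)) (l : List String)
    (f : String) (differ reset : Bool) :
    (altLoop row l (some f) differ reset).1 =
      (differ || l.any (fun k => pvLookup row k != f)) := by
  induction l generalizing differ reset with
  | nil => simp [altLoop]
  | cons k rest ih =>
    simp [altLoop, ih, Bool.or_assoc]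

-- a list with two distinct members has length > 1
theorem one_lt_length_of_two_mem {α : Type} {l : List α} {a b : α}
    (ha : a ∈ l) (hb : b ∈ l) (hab : a ≠ b) : 1 < l.length := by
  cases l with
  | nil => cases ha
  | cons x t =>
    cases t with
    | nil =>
      simp at ha hb
      exact absurd (ha.trans hb.symm) hab
    | cons y u => simp

-- folding Set.add of copies of v0 onto [v0] keeps [v0]
theorem foldl_add_const (v0 : String) (l : List String) (h : ∀ v ∈ l, v = v0) :
    l.foldl PySem.Set.add [v0] = [v0] := by
  induction l with
  | nil => rfl
  | cons x t ih =>
    have hx : x = v0 := h x (by simp)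
    subst hx
    have hadd : PySem.Set.add [x] x = [x] := by simp [PySem.Set.add, PySem.Set.contains]
    simp only [List.foldl_cons, hadd]
    exact ih (fun v hv => h v (by simp [hv]))

-- len(set(v0::l)) > 1 iff some element of l differs from v0
theorem ofList_len_gt_one (v0 : String) (l : List String) :
    (1 < (PySem.Set.ofList (v0 :: l)).length) ↔ (l.any (fun v => v != v0)) = true := by
  constructor
  · intro h
    by_contra hany
    simp only [List.any_eq_true, bne_iff_ne, ne_eq, not_exists, not_and, not_not] at hany
    have : PySem.Set.ofList (v0 :: l) = [v0] := by
      have : PySem.Set.ofList (v0 :: l) = l.foldl PySem.Set.add [v0] := rfl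
      rw [this, foldl_add_const v0 l hany]
    rw [this] at h
    simp at h
  · intro h
    simp only [List.any_eq_true, bne_iff_ne, ne_eq] at h
    obtain ⟨v, hv, hne⟩ := h
    exact one_lt_length_of_two_mem
      ((PySem.Set.mem_ofList _ _).mpr (by simp [hv]))
      ((PySem.Set.mem_ofList _ _).mpr (by simp)) hne

-- any over set(xs) = any over xs
theorem any_ofList (l : List String) (p : String → Bool) :
    (PySem.Set.ofList l).any p = l.any p := by
  rw [Bool.eq_iff_iff]
  simp only [List.any_eq_true]
  constructor <;> rintro ⟨v, hv, hp⟩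
  · exact ⟨v, (PySem.Set.mem_ofList _ _).mp hv, hp⟩
  · exact ⟨v, (PySem.Set.mem_ofList _ _).mpr hv, hp⟩

-- ===== VERDICT (by name: the statement is the Claim_ definition above) =====
theorem bf_status_spec : Claim_equal_bf_status := by
  intro row keys _ _
  unfold Spec_bf_status bf_status bf_status_alt
  cases keys with
  | nil => simp [bfRLoop, altLoop]
  | cons k rest =>
    rw [PySem.List.foldl_append_singleton_eq_map]
    simp only [List.nil_append, List.map_cons]
    rw [bfRLoop_eq, any_ofList]
    simp only [altLoop, altLoop_fst_some, altLoop_snd, Bool.false_or]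
    simp only [gt_iff_lt, ofList_len_gt_one, List.any_map, List.any_cons, Function.comp_def]
    cases hb : (rest.any fun k' => pvLookup row k' != pvLookup row k) <;>
      cases hr : ((pvLookup row k != pvLookup row pvResetKey) ||
          rest.any fun k' => pvLookup row k' != pvLookup row pvResetKey) <;>
      rfl
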